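-- pv_equiv track=rewrite | github.com/i960107/algorithm | programmers/level2_행렬테두리회전하기.py | solution
-- ===== SOURCE A (Python) =====
-- from typing import List
--
-- def solution(rows: int, columns: int, queries: List[List]) -> List[int]:
--     answer = []
--     # stack = []
--     # rows * columns 배열을 만들어두는건 공간 복잡도 너무 높지 않나?
--     # dict형에 바뀐 자리만 넣어둘까?
--     # key: 행+열 문자열, value: 값. 값이 있다면 그자리 값이 바뀐 것
--     d = {}
--     for x1, y1, x2, y2 in queries:
--         # 바꿀 숫자들은 계산 stack에 넣은 후 pop?
--         # 첫번째 결과가 두번째에 영향을 미칠 수 있고 계산불가, 돌면서 값 기억해두는게 좋음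
--         # 바꿀 숫자들을 계산해서 바로바로 넣어주기?
--         # 돌면서 전 숫자 기억해두었다가 현재 위치랑 연결 ->d에 넣어주기
--         min = -1
--         r, c = x1, y1
--         cnt = (x2 - x1) * 2 + (y2 - y1) * 2 + 1
--         prev = None
--         while True:
--             if cnt == 0:
--                 break
--             box_id = (r - 1) * columns + c
--
--             if d.get(box_id, None) is not None:
--                 curr = d[box_id]
--             else:
--                 curr = box_id
--
--             if prev:
--                 d[box_id] = prev
--             prev = curr
--             cnt -= 1
--             min = curr if min == -1 or min > curr else min
--             # 1단계 왼->오 진행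
--             if r == x1 and c < y2:
--                 c += 1
--             # 2단계 위->아래 진행
--             elif r < x2 and c == y2:
--                 r += 1
--             # 3단계 오->왼 진행
--             elif r == x2 and c > y1:
--                 c -= 1
--             # 4단계 아래->위 진행
--             elif r > x1 and c == y1:
--                 r -= 1
--             # 반복문 종료
--
--         answer.append(min)
--
--     return answer
-- ===== SOURCE B (Python) =====
-- from typing import List
--
-- def solution(rows: int, columns: int, queries: List[List]) -> List[int]:
--     answer = []
--     d = {}
--     for x1, y1, x2, y2 in queries:
--         # clockwise perimeter of the rectangle
--         cells = [(x1, c) for c in range(y1, y2 + 1)]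
--         cells += [(r, y2) for r in range(x1 + 1, x2 + 1)]
--         cells += [(x2, c) for c in range(y2 - 1, y1 - 1, -1)]
--         cells += [(r, y1) for r in range(x2 - 1, x1, -1)]
--         ids = [(r - 1) * columns + c for r, c in cells]
--         vals = [d.get(i, i) for i in ids]
--         answer.append(min(vals))
--         for i, cell_id in enumerate(ids):
--             d[cell_id] = vals[i - 1]
--     return answer
-- ===== Notes on version B (the rewrite author's own statement) =====
-- stated objective: simpler
-- what changed: A walks the border once with movement rules, propagating the previous cell's value through the dict while tracking a -1-sentinel running minimum; B builds the explicit clockwise perimeter list, reads all border values, takes min(), and writes the cyclic shift (new[i]=old[i-1]) in a separate pass.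
-- outside the precondition, e.g. on solution(3, 3, [[1, 1, 1, 3], [1, 1, 1, 3]]): A returns [1, 1], B returns [1, 2]; on solution(2, 1, [[1, 1, 2, 2], [1, 1, 2, 2]]): A returns [1, 1], B returns [1, 2]; on solution(3, 3, [[1, 1, 2]]): A raises ValueError, B raises ValueError
import Mathlib
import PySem

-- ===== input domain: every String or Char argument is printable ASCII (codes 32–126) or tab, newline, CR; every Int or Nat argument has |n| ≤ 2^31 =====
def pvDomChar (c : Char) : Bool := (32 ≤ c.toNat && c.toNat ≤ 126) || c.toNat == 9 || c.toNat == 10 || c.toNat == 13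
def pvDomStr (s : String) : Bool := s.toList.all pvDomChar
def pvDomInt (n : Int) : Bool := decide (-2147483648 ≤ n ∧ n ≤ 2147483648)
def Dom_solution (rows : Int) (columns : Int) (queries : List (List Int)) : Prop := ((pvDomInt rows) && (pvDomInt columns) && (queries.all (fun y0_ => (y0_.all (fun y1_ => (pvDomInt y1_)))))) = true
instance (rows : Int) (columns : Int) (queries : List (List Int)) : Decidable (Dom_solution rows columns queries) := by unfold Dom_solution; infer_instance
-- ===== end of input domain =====

-- B replaces A's single interleaved border walk (prev-propagation with sentinel min) by an explicit
-- clockwise perimeter list: read all border values, take min(), then write the cyclic shift in a second pass.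

-- ===== PORT A =====
-- the four movement rules of A's while-loop, in source order
def moveA (x1 y1 x2 y2 r c : Int) : Int × Int :=
  if r = x1 ∧ c < y2 then (r, c + 1)
  else if r < x2 ∧ c = y2 then (r + 1, c)
  else if r = x2 ∧ c > y1 then (r, c - 1)
  else if r > x1 ∧ c = y1 then (r - 1, c)
  else (r, c)

-- A's `while True` body; fuel = cnt.toNat (the loop runs exactly cnt times when cnt ≥ 0;
-- for cnt < 0 Python diverges — those inputs are outside Pre_solution)
def loopA (columns x1 y1 x2 y2 : Int) : Nat → Int → Int → Option Int → Int → PySem.Dict Int Int → PySem.Dict Int Int × Int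
  | 0, _r, _c, _prev, mn, d => (d, mn)
  | n + 1, r, c, prev, mn, d =>
    let boxId := (r - 1) * columns + c
    -- `curr = d[box_id] if d.get(box_id, None) is not None else box_id`
    let curr := (d.get? boxId).getD boxId
    -- `if prev: d[box_id] = prev`  (falsy when None or 0)
    let d' := match prev with
      | some p => if p ≠ 0 then d.insert boxId p else d
      | none => d
    -- `min = curr if min == -1 or min > curr else min`
    let mn' := if mn = -1 ∨ mn > curr then curr else mn
    let rc := moveA x1 y1 x2 y2 r c
    loopA columns x1 y1 x2 y2 n rc.1 rc.2 (some curr) mn' d'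

-- one iteration of A's `for x1, y1, x2, y2 in queries` body
def stepA (columns : Int) (st : PySem.Dict Int Int × List Int) (q : List Int) :
    PySem.Dict Int Int × List Int :=
  match q with
  | [x1, y1, x2, y2] =>
    let cnt := (x2 - x1) * 2 + (y2 - y1) * 2 + 1
    let res := loopA columns x1 y1 x2 y2 cnt.toNat x1 y1 none (-1) st.1
    (res.1, st.2 ++ [res.2])
  | _ => st   -- Python raises ValueError unpacking here; outside Pre_solution

def solution (rows : Int) (columns : Int) (queries : List (List Int)) : List Int :=
  (queries.foldl (stepA columns) ((PySem.Dict.empty : PySem.Dict Int Int), ([] : List Int))).2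

-- ===== PORT B =====
-- clockwise perimeter cells of the rectangle, as in Source B
def perimB (x1 y1 x2 y2 : Int) : List (Int × Int) :=
  (PySem.List.pyRange y1 (y2 + 1) 1).map (fun c => (x1, c))
  ++ (PySem.List.pyRange (x1 + 1) (x2 + 1) 1).map (fun r => (r, y2))
  ++ (PySem.List.pyRange (y2 - 1) (y1 - 1) (-1)).map (fun c => (x2, c))
  ++ (PySem.List.pyRange (x2 - 1) x1 (-1)).map (fun r => (r, y1))

-- one iteration of B's loop body
def stepB (columns : Int) (st : PySem.Dict Int Int × List Int) (q : List Int) :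
    PySem.Dict Int Int × List Int :=
  match q with
  | [x1, y1, x2, y2] =>
    let ids := (perimB x1 y1 x2 y2).map (fun p => (p.1 - 1) * columns + p.2)
    let vals := ids.map (fun i => st.1.getD i i)
    -- min(vals); vals is nonempty on every input Pre_solution admits
    let mn := (PySem.List.min? vals (fun v => v)).getD 0
    -- for i, cell_id in enumerate(ids): d[cell_id] = vals[i - 1]
    let d' := (PySem.List.enumerate ids 0).foldl
      (fun d p => d.insert p.2 ((PySem.List.pyGet? vals (p.1 - 1)).getD 0)) st.1
    (d', st.2 ++ [mn])
  | _ => st   -- Python raises ValueError unpacking here; outside Pre_solution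

def solution_alt (rows : Int) (columns : Int) (queries : List (List Int)) : List Int :=
  (queries.foldl (stepB columns) ((PySem.Dict.empty : PySem.Dict Int Int), ([] : List Int))).2

-- ===== PRECONDITION & SPEC =====
-- Pre_ restricts to the problem's natural domain: each query is [x1,y1,x2,y2] with
-- 1 ≤ x1 < x2 and 1 ≤ y1 < y2 ≤ columns.  Outside it A raises ValueError (wrong arity),
-- hangs (x2-x1+y2-y1 < 0), or — on degenerate rectangles and on y2 > columns, where border
-- cells are revisited or share a box id — returns an accidental value of its interleaved
-- read/write walk that is no more canonical than B's two-pass value.  rows is unused by both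
-- programs and is not constrained.
def qokB (columns : Int) (q : List Int) : Bool :=
  match q with
  | [x1, y1, x2, y2] => decide (1 ≤ x1 ∧ x1 < x2 ∧ 1 ≤ y1 ∧ y1 < y2 ∧ y2 ≤ columns)
  | _ => false

def Pre_solution (rows : Int) (columns : Int) (queries : List (List Int)) : Prop :=
  ∀ q ∈ queries, qokB columns q = true

instance (rows : Int) (columns : Int) (queries : List (List Int)) : Decidable (Pre_solution rows columns queries) := by
  unfold Pre_solution; infer_instance

def pvWitness_solution : Int × Int × List (List Int) := (3, 3, [[1, 1, 2, 3], [1, 2, 3, 3]])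

def Spec_solution (rows : Int) (columns : Int) (queries : List (List Int)) (out : List Int) : Prop := out = solution_alt rows columns queries
instance (rows : Int) (columns : Int) (queries : List (List Int)) (out : List Int) : Decidable (Spec_solution rows columns queries out) := by unfold Spec_solution; infer_instance

-- ===== CLAIM (what is proved, stated in full; the proofs are below) =====
def Claim_equal_solution : Prop := ∀ (rows : Int) (columns : Int) (queries : List (List Int)), Dom_solution rows columns queries → Pre_solution rows columns queries → Spec_solution rows columns queries (solution rows columns queries)

-- ===== LEMMAS AND PROOFS =====

-- ===== LEMMAS AND PROOFS =====

-- ---- proof-side recursions mirroring A's loop ----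

-- the (r,c) trajectory of A's loop
def pathA (x1 y1 x2 y2 : Int) : Int → Int → Nat → List (Int × Int)
  | _, _, 0 => []
  | r, c, n + 1 =>
    (r, c) :: pathA x1 y1 x2 y2 (moveA x1 y1 x2 y2 r c).1 (moveA x1 y1 x2 y2 r c).2 n

def minUpdA (mn v : Int) : Int := if mn = -1 ∨ mn > v then v else mn

-- A's loop body as a fold over the list of visited box ids
def goA : List Int → Option Int → Int → PySem.Dict Int Int → PySem.Dict Int Int × Int
  | [], _, mn, d => (d, mn)
  | i :: rest, prev, mn, d =>
    let curr := (d.get? i).getD i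
    let d' := match prev with
      | some p => if p ≠ 0 then d.insert i p else d
      | none => d
    goA rest (some curr) (minUpdA mn curr) d'

def insPairs (d : PySem.Dict Int Int) (ps : List (Int × Int)) : PySem.Dict Int Int :=
  ps.foldl (fun d p => d.insert p.1 p.2) d

def valsOf (d : PySem.Dict Int Int) (ids : List Int) : List Int :=
  ids.map (fun i => d.getD i i)

def idsOf (columns x1 y1 x2 y2 : Int) : List Int :=
  (perimB x1 y1 x2 y2).map (fun p => (p.1 - 1) * columns + p.2)

lemma loopA_eq_goA (columns x1 y1 x2 y2 : Int) :
    ∀ (n : Nat) (r c : Int) (prev : Option Int) (mn : Int) (d : PySem.Dict Int Int),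
    loopA columns x1 y1 x2 y2 n r c prev mn d
      = goA ((pathA x1 y1 x2 y2 r c n).map (fun p => (p.1 - 1) * columns + p.2)) prev mn d := by
  intro n
  induction n with
  | zero => intro r c prev mn d; rfl
  | succ n ih =>
    intro r c prev mn d
    simp only [loopA, pathA, goA, List.map_cons, minUpdA]
    rw [ih]

-- ---- geometry: the trajectory is the explicit clockwise perimeter ----

lemma pyRange_neg_append (a b : Int) (h : b ≤ a) :
    PySem.List.pyRange a (b - 1) (-1) = PySem.List.pyRange a b (-1) ++ [b] := by
  have key : ∀ (n : Nat) (a : Int), b ≤ a → (a - b).toNat = n →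
      PySem.List.pyRange a (b - 1) (-1) = PySem.List.pyRange a b (-1) ++ [b] := by
    intro n
    induction n with
    | zero =>
      intro a ha h0
      have : a = b := by omega
      subst this
      rw [PySem.List.pyRange_neg_one_cons (by omega), PySem.List.pyRange_neg_one_eq_nil (by omega),
        PySem.List.pyRange_neg_one_eq_nil (by omega)]
      rfl
    | succ k ih =>
      intro a ha h0
      rw [PySem.List.pyRange_neg_one_cons (show b - 1 < a by omega),
        PySem.List.pyRange_neg_one_cons (show b < a by omega), ih (a - 1) (by omega) (by omega)]
      rfl
  exact key (a - b).toNat a h rfl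

lemma phaseTop (x1 y1 x2 y2 : Int) (hx : x1 < x2) (m : Nat) :
    ∀ (k : Nat) (c : Int), c + k = y2 → y1 ≤ c →
    pathA x1 y1 x2 y2 x1 c (k + m)
      = (PySem.List.pyRange c y2 1).map (fun cc => (x1, cc)) ++ pathA x1 y1 x2 y2 x1 y2 m := by
  intro k
  induction k with
  | zero =>
    intro c h1 _
    have : c = y2 := by omega
    subst this
    rw [PySem.List.pyRange_one_eq_nil (le_refl _)]
    simp
  | succ k ih =>
    intro c h1 h2
    have hc : c < y2 := by omega
    have hmv : moveA x1 y1 x2 y2 x1 c = (x1, c + 1) := by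
      unfold moveA; rw [if_pos ⟨rfl, hc⟩]
    have he : k + 1 + m = (k + m) + 1 := by omega
    rw [he]
    simp only [pathA, hmv]
    rw [ih (c + 1) (by omega) (by omega), PySem.List.pyRange_one_cons hc]
    rfl

lemma phaseRight (x1 y1 x2 y2 : Int) (m : Nat) :
    ∀ (k : Nat) (r : Int), r + k = x2 → x1 ≤ r →
    pathA x1 y1 x2 y2 r y2 (k + m)
      = (PySem.List.pyRange r x2 1).map (fun rr => (rr, y2)) ++ pathA x1 y1 x2 y2 x2 y2 m := by
  intro k
  induction k with
  | zero =>
    intro r h1 _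
    have : r = x2 := by omega
    subst this
    rw [PySem.List.pyRange_one_eq_nil (le_refl _)]
    simp
  | succ k ih =>
    intro r h1 h2
    have hr : r < x2 := by omega
    have hmv : moveA x1 y1 x2 y2 r y2 = (r + 1, y2) := by
      unfold moveA
      rw [if_neg (by omega : ¬(r = x1 ∧ y2 < y2)), if_pos ⟨hr, rfl⟩]
    have he : k + 1 + m = (k + m) + 1 := by omega
    rw [he]
    simp only [pathA, hmv]
    rw [ih (r + 1) (by omega) (by omega), PySem.List.pyRange_one_cons hr]
    rfl

lemma phaseBottom (x1 y1 x2 y2 : Int) (hx : x1 < x2) (m : Nat) :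
    ∀ (k : Nat) (c : Int), c - k = y1 → c ≤ y2 →
    pathA x1 y1 x2 y2 x2 c (k + m)
      = (PySem.List.pyRange c y1 (-1)).map (fun cc => (x2, cc)) ++ pathA x1 y1 x2 y2 x2 y1 m := by
  intro k
  induction k with
  | zero =>
    intro c h1 _
    have : c = y1 := by omega
    subst this
    rw [PySem.List.pyRange_neg_one_eq_nil (le_refl _)]
    simp
  | succ k ih =>
    intro c h1 h2
    have hc : y1 < c := by omega
    have hmv : moveA x1 y1 x2 y2 x2 c = (x2, c - 1) := by
      unfold moveA
      rw [if_neg (by omega : ¬(x2 = x1 ∧ c < y2)), if_neg (by omega : ¬(x2 < x2 ∧ c = y2)),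
        if_pos ⟨rfl, hc⟩]
    have he : k + 1 + m = (k + m) + 1 := by omega
    rw [he]
    simp only [pathA, hmv]
    rw [ih (c - 1) (by omega) (by omega), PySem.List.pyRange_neg_one_cons hc]
    rfl

lemma phaseLeft (x1 y1 x2 y2 : Int) (hy : y1 < y2) (m : Nat) :
    ∀ (k : Nat) (r : Int), r - k = x1 → r ≤ x2 →
    pathA x1 y1 x2 y2 r y1 (k + m)
      = (PySem.List.pyRange r x1 (-1)).map (fun rr => (rr, y1)) ++ pathA x1 y1 x2 y2 x1 y1 m := by
  intro k
  induction k with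
  | zero =>
    intro r h1 _
    have : r = x1 := by omega
    subst this
    rw [PySem.List.pyRange_neg_one_eq_nil (le_refl _)]
    simp
  | succ k ih =>
    intro r h1 h2
    have hr : x1 < r := by omega
    have hmv : moveA x1 y1 x2 y2 r y1 = (r - 1, y1) := by
      unfold moveA
      rw [if_neg (by omega : ¬(r = x1 ∧ y1 < y2)), if_neg (by omega : ¬(r < x2 ∧ y1 = y2)),
        if_neg (by omega : ¬(r = x2 ∧ y1 > y1)), if_pos ⟨hr, rfl⟩]
    have he : k + 1 + m = (k + m) + 1 := by omega
    rw [he]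
    simp only [pathA, hmv]
    rw [ih (r - 1) (by omega) (by omega), PySem.List.pyRange_neg_one_cons hr]
    rfl

lemma pathA_full (x1 y1 x2 y2 : Int) (hx : x1 < x2) (hy : y1 < y2) :
    pathA x1 y1 x2 y2 x1 y1 ((x2 - x1) * 2 + (y2 - y1) * 2 + 1).toNat
      = perimB x1 y1 x2 y2 ++ [(x1, y1)] := by
  have hn : ((x2 - x1) * 2 + (y2 - y1) * 2 + 1).toNat
      = (y2 - y1).toNat + ((x2 - x1).toNat + ((y2 - y1).toNat + ((x2 - x1).toNat + 1))) := by omega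
  rw [hn]
  rw [phaseTop x1 y1 x2 y2 hx _ (y2 - y1).toNat y1 (by omega) (le_refl _)]
  rw [phaseRight x1 y1 x2 y2 _ (x2 - x1).toNat x1 (by omega) (le_refl _)]
  rw [phaseBottom x1 y1 x2 y2 hx _ (y2 - y1).toNat y2 (by omega) (le_refl _)]
  rw [phaseLeft x1 y1 x2 y2 hy _ (x2 - x1).toNat x2 (by omega) (le_refl _)]
  have h1 : pathA x1 y1 x2 y2 x1 y1 1 = [(x1, y1)] := rfl
  rw [h1, perimB]
  rw [PySem.List.pyRange_one_succ_right (le_of_lt hy),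
    PySem.List.pyRange_one_succ_right (by omega : x1 + 1 ≤ x2),
    pyRange_neg_append (y2 - 1) y1 (by omega)]
  rw [PySem.List.pyRange_one_cons hx, PySem.List.pyRange_neg_one_cons hy,
    PySem.List.pyRange_neg_one_cons hx]
  simp [List.map_append, List.append_assoc]

-- ---- insPairs characterisation ----

lemma get?_insPairs_not_mem :
    ∀ (ps : List (Int × Int)) (d : PySem.Dict Int Int) (k : Int),
    k ∉ ps.map (·.1) → (insPairs d ps).get? k = d.get? k := by
  intro ps
  induction ps with
  | nil => intro d k _; rfl
  | cons p t ih =>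
    intro d k hk
    simp only [List.map_cons, List.mem_cons, not_or] at hk
    rw [insPairs, List.foldl_cons, show (List.foldl (fun d p => d.insert p.1 p.2)
      (d.insert p.1 p.2) t) = insPairs (d.insert p.1 p.2) t from rfl, ih _ _ hk.2,
      PySem.Dict.get?_insert_of_ne _ _ hk.1]

lemma get?_insPairs_of_mem :
    ∀ (ps : List (Int × Int)) (d : PySem.Dict Int Int) (k v : Int),
    (ps.map (·.1)).Nodup → (k, v) ∈ ps → (insPairs d ps).get? k = some v := by
  intro ps
  induction ps with
  | nil => intro d k v _ h; simp at h
  | cons p t ih =>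
    intro d k v hnd hm
    simp only [List.map_cons, List.nodup_cons] at hnd
    rcases List.mem_cons.1 hm with h | h
    · have hk : p = (k, v) := h.symm
      subst hk
      rw [insPairs, List.foldl_cons,
        show (List.foldl (fun d p => d.insert p.1 p.2) (d.insert k v) t) = insPairs (d.insert k v) t from rfl,
        get?_insPairs_not_mem t _ k hnd.1, PySem.Dict.get?_insert_self]
    · exact ih _ k v hnd.2 h

lemma get?_insPairs_values :
    ∀ (ps : List (Int × Int)) (d : PySem.Dict Int Int) (k v : Int),
    (insPairs d ps).get? k = some v → v ∈ ps.map (·.2) ∨ d.get? k = some v := by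
  intro ps
  induction ps with
  | nil => intro d k v h; exact Or.inr h
  | cons p t ih =>
    intro d k v h
    rw [insPairs, List.foldl_cons] at h
    rcases ih _ k v h with h' | h'
    · exact Or.inl (List.mem_cons_of_mem _ h')
    · rw [PySem.Dict.get?_insert] at h'
      by_cases hk : k = p.1
      · rw [if_pos hk] at h'
        exact Or.inl (by simp [← Option.some_inj.1 h'])
      · rw [if_neg hk] at h'
        exact Or.inr h'

-- ---- min lemmas ----

lemma foldl_minUpdA_eq_min :
    ∀ (vs : List Int) (mn : Int), 1 ≤ mn → (∀ v ∈ vs, 1 ≤ v) →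
    vs.foldl minUpdA mn = vs.foldl min mn := by
  intro vs
  induction vs with
  | nil => intro mn _ _; rfl
  | cons v t ih =>
    intro mn hmn hv
    have h1 : minUpdA mn v = min mn v := by
      unfold minUpdA
      have hv1 : 1 ≤ v := hv v (List.mem_cons_self ..)
      rcases le_or_gt mn v with h | h
      · rw [if_neg (by omega), min_eq_left h]
      · rw [if_pos (Or.inr h), min_eq_right (le_of_lt h)]
    rw [List.foldl_cons, List.foldl_cons, h1,
      ih (min mn v) (le_min hmn (hv v (List.mem_cons_self ..))) (fun w hw => hv w (List.mem_cons_of_mem _ hw))]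

lemma foldl_min_le : ∀ (vs : List Int) (a : Int), vs.foldl min a ≤ a := by
  intro vs
  induction vs with
  | nil => intro a; exact le_refl a
  | cons v t ih => intro a; exact le_trans (ih (min a v)) (min_le_left _ _)

-- ---- nodup / bounds of the perimeter ----

lemma mem_perimB (x1 y1 x2 y2 : Int) (hx : x1 < x2) (hy : y1 < y2) :
    ∀ p ∈ perimB x1 y1 x2 y2, x1 ≤ p.1 ∧ p.1 ≤ x2 ∧ y1 ≤ p.2 ∧ p.2 ≤ y2 := by
  intro p hp
  simp only [perimB, List.append_assoc, List.mem_append, List.mem_map,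
    PySem.List.mem_pyRange_one, PySem.List.mem_pyRange_neg_one] at hp
  rcases hp with ⟨c, hc, rfl⟩ | ⟨r, hr, rfl⟩ | ⟨c, hc, rfl⟩ | ⟨r, hr, rfl⟩ <;> omega

lemma nodup_neg_range (a b : Int) : (PySem.List.pyRange a b (-1)).Nodup := by
  rw [PySem.List.pyRange_neg_one_eq_reverse]
  exact (List.nodup_reverse).2 (PySem.List.nodup_pyRange_one _ _)

lemma nodup_perimB (x1 y1 x2 y2 : Int) (hx : x1 < x2) (hy : y1 < y2) :
    (perimB x1 y1 x2 y2).Nodup := by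
  have hinjR : ∀ a : Int, Function.Injective (fun c : Int => (a, c)) := by
    intro a u v h; simpa using h
  have hinjC : ∀ a : Int, Function.Injective (fun r : Int => (r, a)) := by
    intro a u v h; simpa using h
  rw [perimB]
  simp only [List.append_assoc, List.nodup_append]
  refine ⟨(PySem.List.nodup_pyRange_one _ _).map (hinjR x1),
    ⟨(PySem.List.nodup_pyRange_one _ _).map (hinjC y2),
      ⟨(nodup_neg_range _ _).map (hinjR x2), (nodup_neg_range _ _).map (hinjC y1), ?_⟩, ?_⟩, ?_⟩
  · -- bottom row vs left column
    intro p h3 q h4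
    simp only [List.mem_map, PySem.List.mem_pyRange_neg_one] at h3 h4
    obtain ⟨c, hc, rfl⟩ := h3
    obtain ⟨r, hr, rfl⟩ := h4
    simp only [ne_eq, Prod.mk.injEq, not_and]
    omega
  · -- right column vs bottom row / left column
    intro p h2 q h34
    simp only [List.mem_map, List.mem_append, PySem.List.mem_pyRange_one,
      PySem.List.mem_pyRange_neg_one] at h2 h34
    obtain ⟨r, hr, rfl⟩ := h2
    rcases h34 with ⟨c, hc, rfl⟩ | ⟨r', hr', rfl⟩ <;>
      simp only [ne_eq, Prod.mk.injEq, not_and] <;> omega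
  · -- top row vs the rest
    intro p h1 q h234
    simp only [List.mem_map, List.mem_append, PySem.List.mem_pyRange_one,
      PySem.List.mem_pyRange_neg_one] at h1 h234
    obtain ⟨c, hc, rfl⟩ := h1
    rcases h234 with ⟨r, hr, rfl⟩ | ⟨c', hc', rfl⟩ | ⟨r, hr, rfl⟩ <;>
      simp only [ne_eq, Prod.mk.injEq, not_and] <;> omega

lemma boxId_inj (columns r c r' c' : Int) (hc1 : 1 ≤ c) (hc2 : c ≤ columns)
    (hc1' : 1 ≤ c') (hc2' : c' ≤ columns)
    (h : (r - 1) * columns + c = (r' - 1) * columns + c') : r = r' ∧ c = c' := by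
  have h2 : (r - r') * columns = c' - c := by linear_combination h
  have hr : r = r' := by
    rcases lt_trichotomy r r' with hlt | heq | hgt
    · exfalso
      have hm : (r - r') * columns ≤ (-1) * columns :=
        mul_le_mul_of_nonneg_right (by omega) (by omega)
      linarith
    · exact heq
    · exfalso
      have hm : 1 * columns ≤ (r - r') * columns :=
        mul_le_mul_of_nonneg_right (by omega) (by omega)
      linarith
  subst hr
  simp only [sub_self, zero_mul] at h2
  exact ⟨rfl, by omega⟩

lemma nodup_idsOf (columns x1 y1 x2 y2 : Int) (hx : x1 < x2) (hy : y1 < y2)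
    (hy1 : 1 ≤ y1) (hcol : y2 ≤ columns) :
    (idsOf columns x1 y1 x2 y2).Nodup := by
  apply List.Nodup.map_on _ (nodup_perimB x1 y1 x2 y2 hx hy)
  intro p hp q hq hpq
  have hbp := mem_perimB x1 y1 x2 y2 hx hy p hp
  have hbq := mem_perimB x1 y1 x2 y2 hx hy q hq
  have := boxId_inj columns p.1 p.2 q.1 q.2 (by omega) (by omega) (by omega) (by omega) hpq
  exact Prod.ext this.1 this.2

lemma pos_idsOf (columns x1 y1 x2 y2 : Int) (hx : x1 < x2) (hy : y1 < y2)
    (hx1 : 1 ≤ x1) (hy1 : 1 ≤ y1) (hcol : y2 ≤ columns) :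
    ∀ i ∈ idsOf columns x1 y1 x2 y2, 1 ≤ i := by
  intro i hi
  rcases List.mem_map.1 hi with ⟨p, hp, rfl⟩
  have hb := mem_perimB x1 y1 x2 y2 hx hy p hp
  have hnn : 0 ≤ (p.1 - 1) * columns := mul_nonneg (by omega) (by omega)
  omega

-- ---- goA characterisation ----

lemma goA_spec :
    ∀ (ids : List Int) (last prev mn : Int) (d : PySem.Dict Int Int),
    ids.Nodup → last ∉ ids → 1 ≤ prev → (∀ i ∈ ids, 1 ≤ d.getD i i) →
    goA (ids ++ [last]) (some prev) mn d
      = (insPairs d ((ids ++ [last]).zip (prev :: valsOf d ids)),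
         (valsOf d ids ++ [d.getD last last]).foldl minUpdA mn) := by
  intro ids
  induction ids with
  | nil =>
    intro last prev mn d _ _ hprev _
    simp only [List.nil_append, goA, valsOf, List.map_nil, List.nil_append]
    rw [if_pos (by omega : prev ≠ 0)]
    rw [show ((d.get? last).getD last) = d.getD last last from (PySem.Dict.getD_eq_get?_getD d last last).symm]
    rfl
  | cons i t ih =>
    intro last prev mn d hnd hlast hprev hpos
    have hit : i ∉ t := (List.nodup_cons.1 hnd).1
    have hnt : t.Nodup := (List.nodup_cons.1 hnd).2
    have hlt : last ∉ t := fun h => hlast (List.mem_cons_of_mem _ h)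
    have hli : last ≠ i := fun h => hlast (h ▸ List.mem_cons_self ..)
    simp only [List.cons_append, goA]
    rw [if_pos (by omega : prev ≠ 0)]
    rw [show ((d.get? i).getD i) = d.getD i i from (PySem.Dict.getD_eq_get?_getD d i i).symm]
    have hcurr : 1 ≤ d.getD i i := hpos i (List.mem_cons_self ..)
    rw [ih last (d.getD i i) (minUpdA mn (d.getD i i)) (d.insert i prev) hnt hlt hcurr
      (fun j hj => by
        rw [PySem.Dict.getD_insert, if_neg (fun h : j = i => hit (h ▸ hj))]
        exact hpos j (List.mem_cons_of_mem _ hj))]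
    have hvals : valsOf (d.insert i prev) t = valsOf d t := by
      apply List.map_congr_left
      intro j hj
      rw [PySem.Dict.getD_insert, if_neg (fun h : j = i => hit (h ▸ hj))]
    have hlastD : (d.insert i prev).getD last last = d.getD last last := by
      rw [PySem.Dict.getD_insert, if_neg hli]
    rw [hvals, hlastD]
    have hvcons : valsOf d (i :: t) = d.getD i i :: valsOf d t := rfl
    rw [hvcons]
    rfl

-- ---- the rotated write lists ----

lemma zip_rot_eq (rest : List Int) (id0 : Int) (vals : List Int)
    (h : vals.length = rest.length + 1) :
    (rest ++ [id0]).zip vals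
      = (PySem.List.enumerate rest 1).map
          (fun p => (p.2, (PySem.List.pyGet? vals (p.1 - 1)).getD 0))
        ++ [(id0, (PySem.List.pyGet? vals ((0 : Int) - 1)).getD 0)] := by
  apply List.ext_getElem
  · simp [h]
  · intro j hj1 hj2
    have hlen : ((rest ++ [id0]).zip vals).length = rest.length + 1 := by simp [h]
    have hjlt : j < rest.length + 1 := by omega
    rw [List.getElem_zip]
    by_cases hjr : j < rest.length
    · rw [List.getElem_append_left (by simpa using hjr),
        List.getElem_append_left (by simpa using hjr), List.getElem_map,
        PySem.List.getElem_enumerate]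
      have harg : (1 + (j : Int) - 1) = (j : Int) := by omega
      rw [harg, PySem.List.pyGet?_natCast, List.getElem?_eq_getElem (by omega)]
      rfl
    · have hj : j = rest.length := by omega
      subst hj
      rw [List.getElem_concat_length]
      have hR : (List.map (fun p => (p.2, (PySem.List.pyGet? vals (p.1 - 1)).getD 0))
          (PySem.List.enumerate rest 1) ++ [(id0, (PySem.List.pyGet? vals ((0 : Int) - 1)).getD 0)])[rest.length]
          = (id0, (PySem.List.pyGet? vals ((0 : Int) - 1)).getD 0) := by
        rw [List.getElem_append_right (by simp)]
        simp
      rw [hR]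
      have h01 : ((0 : Int) - 1) = -1 := by omega
      rw [h01, PySem.List.pyGet?_neg_one, List.getLast?_eq_getElem?,
        List.getElem?_eq_getElem (by omega)]
      have hidx : vals.length - 1 = rest.length := by omega
      simp [hidx]
      all_goals omega

lemma insPairs_rot (d1 d2 : PySem.Dict Int Int) (hEq : ∀ k, d1.get? k = d2.get? k)
    (p : Int × Int) (Q : List (Int × Int)) (hnd : ((p :: Q).map (·.1)).Nodup) (k : Int) :
    (insPairs d1 (Q ++ [p])).get? k = (insPairs d2 (p :: Q)).get? k := by
  have hperm : (Q ++ [p]).Perm (p :: Q) := List.perm_append_singleton p Q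
  have hndA : ((Q ++ [p]).map (·.1)).Nodup :=
    ((hperm.map (·.1)).nodup_iff).2 hnd
  by_cases hk : k ∈ (p :: Q).map (·.1)
  · rcases List.mem_map.1 hk with ⟨q, hq, hqk⟩
    have hqkv : (k, q.2) ∈ p :: Q := by
      have : q = (k, q.2) := Prod.ext hqk rfl
      exact this ▸ hq
    have hqA : (k, q.2) ∈ Q ++ [p] := hperm.symm.subset hqkv
    rw [get?_insPairs_of_mem _ _ _ _ hndA hqA, get?_insPairs_of_mem _ _ _ _ hnd hqkv]
  · have hkA : k ∉ (Q ++ [p]).map (·.1) := fun h => hk ((hperm.map (·.1)).subset h)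
    rw [get?_insPairs_not_mem _ _ _ hkA, get?_insPairs_not_mem _ _ _ hk]
    exact hEq k

-- ---- per-query equivalence ----

lemma valsOf_congr (d1 d2 : PySem.Dict Int Int) (hEq : ∀ k, d1.get? k = d2.get? k)
    (l : List Int) : valsOf d1 l = valsOf d2 l := by
  apply List.map_congr_left
  intro i _
  rw [PySem.Dict.getD_eq_get?_getD, PySem.Dict.getD_eq_get?_getD, hEq i]

lemma valsOf_pos (d : PySem.Dict Int Int) (hPos : ∀ k v, d.get? k = some v → 1 ≤ v)
    (l : List Int) (hl : ∀ i ∈ l, 1 ≤ i) : ∀ v ∈ valsOf d l, 1 ≤ v := by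
  intro v hv
  rcases List.mem_map.1 hv with ⟨i, hi, rfl⟩
  rw [PySem.Dict.getD_eq_get?_getD]
  cases hg : d.get? i with
  | none => exact hl i hi
  | some u => exact hPos i u hg

lemma goA_none (l : List Int) (i : Int) (mn : Int) (d : PySem.Dict Int Int) :
    goA (i :: l) none mn d
      = goA l (some ((d.get? i).getD i)) (minUpdA mn ((d.get? i).getD i)) d := rfl

lemma foldl_insert_eq_insPairs (vals : List Int) :
    ∀ (l : List (Int × Int)) (d : PySem.Dict Int Int),
    l.foldl (fun d p => d.insert p.2 ((PySem.List.pyGet? vals (p.1 - 1)).getD 0)) d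
      = insPairs d (l.map (fun p => (p.2, (PySem.List.pyGet? vals (p.1 - 1)).getD 0))) := by
  intro l
  induction l with
  | nil => intro d; rfl
  | cons p t ih =>
    intro d
    rw [List.foldl_cons, List.map_cons, insPairs, List.foldl_cons]
    exact ih _

lemma query_core (columns x1 y1 x2 y2 : Int) (d1 d2 : PySem.Dict Int Int)
    (hx1 : 1 ≤ x1) (hx : x1 < x2) (hy1 : 1 ≤ y1) (hy : y1 < y2) (hcol : y2 ≤ columns)
    (hEq : ∀ k, d1.get? k = d2.get? k) (hPos : ∀ k v, d2.get? k = some v → 1 ≤ v) :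
    (loopA columns x1 y1 x2 y2 ((x2 - x1) * 2 + (y2 - y1) * 2 + 1).toNat x1 y1 none (-1) d1).2
        = (PySem.List.min? (valsOf d2 (idsOf columns x1 y1 x2 y2)) (fun v => v)).getD 0
      ∧ (∀ k, (loopA columns x1 y1 x2 y2 ((x2 - x1) * 2 + (y2 - y1) * 2 + 1).toNat x1 y1 none (-1) d1).1.get? k
            = ((PySem.List.enumerate (idsOf columns x1 y1 x2 y2) 0).foldl
                (fun d p => d.insert p.2 ((PySem.List.pyGet? (valsOf d2 (idsOf columns x1 y1 x2 y2)) (p.1 - 1)).getD 0)) d2).get? k)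
      ∧ (∀ k v, ((PySem.List.enumerate (idsOf columns x1 y1 x2 y2) 0).foldl
                (fun d p => d.insert p.2 ((PySem.List.pyGet? (valsOf d2 (idsOf columns x1 y1 x2 y2)) (p.1 - 1)).getD 0)) d2).get? k = some v → 1 ≤ v) := by
  have hnd : (idsOf columns x1 y1 x2 y2).Nodup := nodup_idsOf columns x1 y1 x2 y2 hx hy hy1 hcol
  have hposid : ∀ i ∈ idsOf columns x1 y1 x2 y2, 1 ≤ i := pos_idsOf columns x1 y1 x2 y2 hx hy hx1 hy1 hcol
  have hvalpos : ∀ v ∈ valsOf d2 (idsOf columns x1 y1 x2 y2), 1 ≤ v := valsOf_pos d2 hPos _ hposid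
  obtain ⟨tl, htl⟩ : ∃ tl, perimB x1 y1 x2 y2 = (x1, y1) :: tl :=
    ⟨(PySem.List.pyRange (y1 + 1) (y2 + 1) 1).map (fun c => (x1, c))
      ++ ((PySem.List.pyRange (x1 + 1) (x2 + 1) 1).map (fun r => (r, y2))
      ++ ((PySem.List.pyRange (y2 - 1) (y1 - 1) (-1)).map (fun c => (x2, c))
      ++ (PySem.List.pyRange (x2 - 1) x1 (-1)).map (fun r => (r, y1)))), by
        rw [perimB, PySem.List.pyRange_one_cons (by omega : y1 < y2 + 1)]; simp⟩
  set id0 : Int := (x1 - 1) * columns + y1 with hid0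
  set rest : List Int := tl.map (fun p => (p.1 - 1) * columns + p.2) with hrestdef
  have hidseq : idsOf columns x1 y1 x2 y2 = id0 :: rest := by
    rw [idsOf, htl, List.map_cons]
  have hndr : rest.Nodup := by rw [hidseq] at hnd; exact (List.nodup_cons.1 hnd).2
  have hid0r : id0 ∉ rest := by rw [hidseq] at hnd; exact (List.nodup_cons.1 hnd).1
  have hvcons : valsOf d2 (idsOf columns x1 y1 x2 y2) = d2.getD id0 id0 :: valsOf d2 rest := by
    rw [hidseq]; rfl
  have hmemrest : ∀ i ∈ rest, d2.getD i i ∈ valsOf d2 (idsOf columns x1 y1 x2 y2) := by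
    intro i hi
    rw [hvcons]
    exact List.mem_cons_of_mem _ (List.mem_map_of_mem hi)
  have hv0 : 1 ≤ d2.getD id0 id0 := by
    apply hvalpos
    rw [hvcons]; exact List.mem_cons_self ..
  have hrpos : ∀ v ∈ valsOf d2 rest, 1 ≤ v := fun v hv => by
    rcases List.mem_map.1 hv with ⟨i, hi, rfl⟩
    exact hvalpos _ (hmemrest i hi)
  have hgd : ∀ i : Int, d1.getD i i = d2.getD i i := fun i => by
    rw [PySem.Dict.getD_eq_get?_getD, hEq i, ← PySem.Dict.getD_eq_get?_getD]
  -- A's loop, computed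
  have hA : loopA columns x1 y1 x2 y2 ((x2 - x1) * 2 + (y2 - y1) * 2 + 1).toNat x1 y1 none (-1) d1
      = (insPairs d1 ((rest ++ [id0]).zip (valsOf d2 (idsOf columns x1 y1 x2 y2))),
         (valsOf d2 rest ++ [d2.getD id0 id0]).foldl minUpdA (minUpdA (-1) (d2.getD id0 id0))) := by
    rw [loopA_eq_goA, pathA_full x1 y1 x2 y2 hx hy, List.map_append]
    rw [show ((perimB x1 y1 x2 y2).map (fun p => (p.1 - 1) * columns + p.2))
      = idsOf columns x1 y1 x2 y2 from rfl]
    rw [show ([((x1 : Int), (y1 : Int))].map (fun p => (p.1 - 1) * columns + p.2)) = [id0] from rfl]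
    rw [hidseq, List.cons_append, goA_none]
    have hcurr : (d1.get? id0).getD id0 = d2.getD id0 id0 := by
      rw [hEq id0, ← PySem.Dict.getD_eq_get?_getD]
    rw [hcurr]
    rw [goA_spec rest id0 (d2.getD id0 id0) (minUpdA (-1) (d2.getD id0 id0)) d1 hndr hid0r hv0
      (fun i hi => by rw [hgd i]; exact hrpos _ (List.mem_map_of_mem hi))]
    rw [valsOf_congr d1 d2 hEq rest, hgd id0]
    rfl
  -- B's write pass, as insPairs
  set Q : List (Int × Int) := (PySem.List.enumerate rest 1).map
      (fun p => (p.2, (PySem.List.pyGet? (valsOf d2 (idsOf columns x1 y1 x2 y2)) (p.1 - 1)).getD 0))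
    with hQdef
  set p0 : Int × Int := (id0, (PySem.List.pyGet? (valsOf d2 (idsOf columns x1 y1 x2 y2)) ((0 : Int) - 1)).getD 0)
    with hp0def
  have hzip : (rest ++ [id0]).zip (valsOf d2 (idsOf columns x1 y1 x2 y2)) = Q ++ [p0] := by
    rw [hQdef, hp0def]
    exact zip_rot_eq rest id0 _ (by rw [hvcons, valsOf]; simp)
  have hBd : ((PySem.List.enumerate (idsOf columns x1 y1 x2 y2) 0).foldl
        (fun d p => d.insert p.2 ((PySem.List.pyGet? (valsOf d2 (idsOf columns x1 y1 x2 y2)) (p.1 - 1)).getD 0)) d2)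
      = insPairs d2 (p0 :: Q) := by
    rw [foldl_insert_eq_insPairs (valsOf d2 (idsOf columns x1 y1 x2 y2))]
    rw [show PySem.List.enumerate (idsOf columns x1 y1 x2 y2) 0
        = ((0 : Int), id0) :: PySem.List.enumerate rest 1 from by
      rw [hidseq, PySem.List.enumerate_cons]; norm_num]
    rw [List.map_cons]
  have hfst : (p0 :: Q).map (·.1) = id0 :: rest := by
    rw [hQdef, hp0def, List.map_cons, List.map_map]
    have hc : ((·.1) ∘ (fun p : Int × Int =>
        ((p.2 : Int), (PySem.List.pyGet? (valsOf d2 (idsOf columns x1 y1 x2 y2)) (p.1 - 1)).getD 0)))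
        = (fun p : Int × Int => p.2) := by funext p; rfl
    rw [hc, PySem.List.map_snd_enumerate]
  have hndpq : ((p0 :: Q).map (·.1)).Nodup := by rw [hfst, ← hidseq]; exact hnd
  refine ⟨?_, ?_, ?_⟩
  · -- the appended minimum
    rw [hA]
    show (valsOf d2 rest ++ [d2.getD id0 id0]).foldl minUpdA (minUpdA (-1) (d2.getD id0 id0))
      = (PySem.List.min? (valsOf d2 (idsOf columns x1 y1 x2 y2)) (fun v => v)).getD 0
    have hm0 : minUpdA (-1) (d2.getD id0 id0) = d2.getD id0 id0 := by
      unfold minUpdA; rw [if_pos (Or.inl rfl)]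
    rw [hm0, foldl_minUpdA_eq_min _ _ hv0 (fun v hv => by
      rcases List.mem_append.1 hv with h | h
      · exact hrpos _ h
      · rw [List.mem_singleton.1 h]; exact hv0)]
    rw [List.foldl_append, List.foldl_cons, List.foldl_nil]
    rw [min_eq_left (foldl_min_le _ _)]
    rw [hvcons, PySem.List.min?_id_cons, Option.getD_some]
  · -- the dictionaries agree pointwise
    intro k
    rw [hBd]
    have hA1 : (loopA columns x1 y1 x2 y2 ((x2 - x1) * 2 + (y2 - y1) * 2 + 1).toNat x1 y1 none (-1) d1).1
        = insPairs d1 (Q ++ [p0]) := by rw [hA, ← hzip]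
    rw [hA1]
    exact insPairs_rot d1 d2 hEq p0 Q hndpq k
  · -- all stored values stay ≥ 1
    intro k v hkv
    rw [hBd] at hkv
    rcases get?_insPairs_values _ _ _ _ hkv with h | h
    · have hperm : (Q ++ [p0]).Perm (p0 :: Q) := List.perm_append_singleton _ _
      have hv' : v ∈ (Q ++ [p0]).map (·.2) := ((hperm.map (·.2)).mem_iff).2 h
      rw [← hzip] at hv'
      rcases List.mem_map.1 hv' with ⟨pr, hpr, rfl⟩
      obtain ⟨a, b⟩ := pr
      exact hvalpos _ (List.of_mem_zip hpr).2
    · exact hPos k v h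

-- ---- outer fold over the queries ----

lemma fold_queries (columns : Int) :
    ∀ (qs : List (List Int)) (d1 d2 : PySem.Dict Int Int) (acc : List Int),
    (∀ q ∈ qs, qokB columns q = true) →
    (∀ k, d1.get? k = d2.get? k) → (∀ k v, d2.get? k = some v → 1 ≤ v) →
    (qs.foldl (stepA columns) (d1, acc)).2 = (qs.foldl (stepB columns) (d2, acc)).2 := by
  intro qs
  induction qs with
  | nil => intro d1 d2 acc _ _ _; rfl
  | cons q qs ih =>
    intro d1 d2 acc hok hEq hPos
    have hq := hok q (List.mem_cons_self ..)
    match q with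
    | [x1, y1, x2, y2] =>
      simp only [qokB, decide_eq_true_eq] at hq
      obtain ⟨hx1, hx, hy1, hy, hcol⟩ := hq
      obtain ⟨hmn, hdict, hpos'⟩ := query_core columns x1 y1 x2 y2 d1 d2 hx1 hx hy1 hy hcol hEq hPos
      simp only [List.foldl_cons, stepA, stepB]
      rw [show ((perimB x1 y1 x2 y2).map (fun p => (p.1 - 1) * columns + p.2))
        = idsOf columns x1 y1 x2 y2 from rfl]
      rw [show ((idsOf columns x1 y1 x2 y2).map (fun i => d2.getD i i))
        = valsOf d2 (idsOf columns x1 y1 x2 y2) from rfl]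
      rw [hmn]
      exact ih _ _ _ (fun q hq => hok q (List.mem_cons_of_mem _ hq)) hdict hpos'
    | [] => exact absurd hq (by simp [qokB])
    | [_] => exact absurd hq (by simp [qokB])
    | [_, _] => exact absurd hq (by simp [qokB])
    | [_, _, _] => exact absurd hq (by simp [qokB])
    | _ :: _ :: _ :: _ :: _ :: _ => exact absurd hq (by simp [qokB])

-- ===== VERDICT (by name: the statement is the Claim_ definition above) =====
theorem solution_spec : Claim_equal_solution := by
  intro rows columns queries _ hPre
  unfold Spec_solution solution solution_alt
  exact fold_queries columns queries PySem.Dict.empty PySem.Dict.empty [] hPre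
    (fun _ => rfl) (fun k v h => by simp [PySem.Dict.get?_empty] at h)
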